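-- pv_equiv track=rewrite | github.com/asigalov61/midicap | midicap/fast_analyzer.py | _build_patch_timelines
-- ===== SOURCE A (Python) =====
-- import collections
-- from typing import Any, Dict, List, Optional, Tuple, Set
--
-- def _build_patch_timelines(tracks: List) -> Dict[int, List[Tuple[int, int]]]:
--     """Build timeline of patch changes per channel. O(events)."""
--     timelines: Dict[int, List[Tuple[int, int]]] = collections.defaultdict(list)
--     for track in tracks:
--         for event in track:
--             if event[0] == 'patch_change':
--                 _, tick, ch, patch = event
--                 timelines[ch].append((tick, patch))
--     for ch in timelines:
--         timelines[ch].sort(key=lambda x: x[0])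
--     return timelines
-- ===== SOURCE B (Python) =====
-- import collections
--
-- def _build_patch_timelines(tracks):
--     """Flat scan -> per-channel filter: collect all patch events once, then
--     emit each channel (in first-appearance order) with its tick-sorted list."""
--     events = [(e[2], (e[1], e[3]))
--               for track in tracks for e in track if e[0] == 'patch_change']
--     timelines = collections.defaultdict(list)
--     for ch in dict.fromkeys(c for c, _ in events):
--         timelines[ch] = sorted((pair for c, pair in events if c == ch),
--                                key=lambda x: x[0])
--     return timelines
-- ===== Notes on version B (the rewrite author's own statement) =====
-- stated objective: alternative
-- what changed: B replaces A's incremental defaultdict append-then-sort-each-key pass with a flat comprehension collecting all (channel,(tick,patch)) events once, an ordered dedup of channels, and one per-channel filter+sort, building each dict entry directly.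
import Mathlib
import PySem

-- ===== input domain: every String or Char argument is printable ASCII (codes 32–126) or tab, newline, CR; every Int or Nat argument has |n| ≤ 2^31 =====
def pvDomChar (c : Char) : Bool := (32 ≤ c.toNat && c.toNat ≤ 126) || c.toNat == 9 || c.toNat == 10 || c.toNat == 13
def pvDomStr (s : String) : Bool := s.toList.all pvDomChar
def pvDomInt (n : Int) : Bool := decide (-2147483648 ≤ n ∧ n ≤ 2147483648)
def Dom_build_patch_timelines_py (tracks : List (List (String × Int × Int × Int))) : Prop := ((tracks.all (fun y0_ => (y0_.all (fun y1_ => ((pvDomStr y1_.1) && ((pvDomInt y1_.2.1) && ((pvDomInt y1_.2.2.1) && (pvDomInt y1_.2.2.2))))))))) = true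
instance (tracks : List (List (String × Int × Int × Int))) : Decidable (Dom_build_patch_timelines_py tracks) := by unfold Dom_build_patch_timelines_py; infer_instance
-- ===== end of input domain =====

-- B collects all patch events in one flat comprehension, dedups the channels, and builds each
-- channel's sorted timeline by a per-channel filter; same return value as A (a defaultdict).

-- ===== PORT A =====
-- event = (kind, tick, ch, patch); defaultdict(list) append loop, then per-key in-place sort
def build_patch_timelines_py (tracks : List (List (String × Int × Int × Int))) : List (Int × List (Int × Int)) :=
  let timelines : PySem.Dict Int (List (Int × Int)) :=
    tracks.foldl (fun d track =>
      track.foldl (fun d event =>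
        if event.1 == "patch_change" then
          d.modify event.2.2.1 [] (· ++ [(event.2.1, event.2.2.2)])
        else d) d) PySem.Dict.empty
  (timelines.keys.foldl (fun d ch =>
      d.insert ch (PySem.List.sorted (d.getD ch []) (fun x => x.1) false)) timelines).items

-- ===== PORT B =====
-- flat comprehension of (ch, (tick, patch)); dict.fromkeys dedup = PySem.List.dedup
def build_patch_timelines_py_alt (tracks : List (List (String × Int × Int × Int))) : List (Int × List (Int × Int)) :=
  let events : List (Int × (Int × Int)) :=
    tracks.flatMap (fun track =>
      (track.filter (fun e => e.1 == "patch_change")).map (fun e => (e.2.2.1, (e.2.1, e.2.2.2))))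
  (PySem.List.dedup (events.map (·.1))).map
    (fun ch => (ch, PySem.List.sorted ((events.filter (fun p => p.1 == ch)).map (·.2)) (fun x => x.1) false))

-- ===== PRECONDITION & SPEC =====
def Spec_build_patch_timelines_py (tracks : List (List (String × Int × Int × Int))) (out : List (Int × List (Int × Int))) : Prop := out = build_patch_timelines_py_alt tracks
instance (tracks : List (List (String × Int × Int × Int))) (out : List (Int × List (Int × Int))) : Decidable (Spec_build_patch_timelines_py tracks out) := by unfold Spec_build_patch_timelines_py; infer_instance

-- ===== CLAIM (what is proved, stated in full; the proofs are below) =====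
def Claim_equal_build_patch_timelines_py : Prop := ∀ (tracks : List (List (String × Int × Int × Int))), Dom_build_patch_timelines_py tracks → Spec_build_patch_timelines_py tracks (build_patch_timelines_py tracks)

-- ===== LEMMAS AND PROOFS =====

-- A's nested build loop equals the flat foldl over B's event list.
theorem build_flatten (tracks : List (List (String × Int × Int × Int)))
    (d : PySem.Dict Int (List (Int × Int))) :
    tracks.foldl (fun d track =>
      track.foldl (fun d event =>
        if event.1 == "patch_change" then
          d.modify event.2.2.1 [] (· ++ [(event.2.1, event.2.2.2)])
        else d) d) d
    = (tracks.flatMap (fun track =>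
        (track.filter (fun e => e.1 == "patch_change")).map (fun e => (e.2.2.1, (e.2.1, e.2.2.2))))).foldl
        (fun d p => d.modify p.1 [] (· ++ [p.2])) d := by
  induction tracks generalizing d with
  | nil => rfl
  | cons t ts ih =>
    simp only [List.foldl_cons, List.flatMap_cons, List.foldl_append, ih]
    congr 1
    rw [List.foldl_map, List.foldl_filter]

-- the in-place per-key sort loop, at the lookup level
theorem get?_foldl_insert_f (f : List (Int × Int) → List (Int × Int)) :
    ∀ (ks : List Int) (d : PySem.Dict Int (List (Int × Int))) (k : Int), ks.Nodup →
    (ks.foldl (fun d ch => d.insert ch (f (d.getD ch []))) d).get? k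
      = if k ∈ ks then some (f (d.getD k [])) else d.get? k := by
  intro ks
  induction ks with
  | nil => intro d k _; simp
  | cons c cs ih =>
    intro d k hnd
    simp only [List.foldl_cons]
    rw [ih _ k (List.Nodup.of_cons hnd)]
    by_cases hk : k ∈ cs
    · have hkc : k ≠ c := by rintro rfl; exact (List.nodup_cons.mp hnd).1 hk
      simp [hk, hkc, PySem.Dict.getD_insert]
    · by_cases hkc : k = c
      · subst hkc
        simp [hk, PySem.Dict.get?_insert_self]
      · simp [hk, hkc, PySem.Dict.get?_insert]

theorem pv_set_update_self (s : List Int) : PySem.Set.update s s = s := by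
  rw [PySem.Set.update_eq_append_filter]
  have : (PySem.Set.ofList s).filter (fun y => !(PySem.Set.contains s y)) = [] := by
    rw [List.filter_eq_nil_iff]
    intro y hy
    have : y ∈ s := (PySem.Set.mem_ofList _ _).mp hy
    simp [PySem.Set.contains, this]
  rw [this, List.append_nil]

theorem build_patch_timelines_eq (tracks : List (List (String × Int × Int × Int))) :
    build_patch_timelines_py tracks = build_patch_timelines_py_alt tracks := by
  unfold build_patch_timelines_py build_patch_timelines_py_alt
  rw [build_flatten]
  set events : List (Int × (Int × Int)) :=
    tracks.flatMap (fun track =>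
      (track.filter (fun e => e.1 == "patch_change")).map (fun e => (e.2.2.1, (e.2.1, e.2.2.2)))) with hev
  set D : PySem.Dict Int (List (Int × Int)) :=
    events.foldl (fun d p => d.modify p.1 [] (· ++ [p.2])) PySem.Dict.empty with hD
  have hkeys : D.keys = PySem.Set.ofList (events.map (·.1)) := by
    rw [hD, PySem.Dict.keys_foldl_modify_key, PySem.Dict.keys_empty, PySem.Set.update_nil_left]
  have hnd : D.keys.Nodup := by rw [hkeys]; exact PySem.Set.nodup_ofList _
  have hgetD : ∀ c, D.getD c [] = (events.filter (fun p => p.1 == c)).map (·.2) := by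
    intro c
    rw [hD, PySem.Dict.getD_foldl_modify_append, PySem.Dict.getD_empty, List.nil_append]
  set f : List (Int × Int) → List (Int × Int) := fun l => PySem.List.sorted l (fun x => x.1) false with hf
  set D2 : PySem.Dict Int (List (Int × Int)) :=
    D.keys.foldl (fun d ch => d.insert ch (f (d.getD ch []))) D with hD2
  have hkeys2 : D2.keys = D.keys := by
    rw [hD2, PySem.Dict.keys_foldl_insert, pv_set_update_self _]
  have hnd2 : D2.keys.Nodup := hkeys2 ▸ hnd
  have hget2 : ∀ k, k ∈ D.keys → D2.getD k [] = f (D.getD k []) := by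
    intro k hk
    rw [PySem.Dict.getD_eq_get?_getD, hD2, get?_foldl_insert_f f _ _ _ hnd, if_pos hk]
    rfl
  rw [PySem.Dict.items_eq_map_keys D2 hnd2 [], hkeys2]
  simp only [PySem.List.dedup_eq_ofList]
  rw [← hkeys]
  apply List.map_congr_left
  intro k hk
  rw [hget2 k hk, hgetD k, hf]
-- ===== VERDICT (by name: the statement is the Claim_ definition above) =====
theorem build_patch_timelines_py_spec : Claim_equal_build_patch_timelines_py := by
  intro tracks _
  exact build_patch_timelines_eq tracks
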